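-- pv_equiv track=rewrite | github.com/OonXiangYu/Numerical_Optimazation | test.py | create_postman_journey
-- ===== SOURCE A (Python) =====
-- def create_postman_journey(race_weeks, cities_data):
--     """
--     Create the postman's journey based on race weeks and constraints.
--     Rules:
--     - Start from Silverstone to Bahrain on week 9
--     - If weeks are continuous, stay at location.
--     - If there are skips, return to Silverstone and move back.
--     - End at Abu Dhabi and return to Silverstone
--     """
--     journey = []
--     current_location = "Silverstone"
--
--     # Map weeks to their corresponding locations
--     week_to_location = {
--         9: 'Bahrain', 10: 'Saudi Arabia', 11: 'Australia', 12: 'Japan', 13: 'China',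
--         14: 'Miami', 15: 'Emilia Romagna', 16: 'Monaco', 17: 'Canada',
--         18: 'Spain', 19: 'Austria', 20: 'Britain', 21: 'Hungary',
--         22: 'Belgium', 23: 'Netherlands', 24: 'Italy', 25: 'Azerbaijan',
--         26: 'Singapore', 27: 'USA', 28: 'Mexico', 29: 'Brazil', 30: 'Las Vegas',
--         31: 'Qatar', 32: 'Abu Dhabi'
--     }
--
--     for idx, week in enumerate(race_weeks):
--         if idx == 0:  # First race - go to Bahrain
--             journey.append(('Silverstone', week_to_location[week]))
--             current_location = week_to_location[week]
--         else:
--             if week - race_weeks[idx - 1] == 1:  # Continuous weeks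
--                 journey.append((current_location, week_to_location[week]))
--                 current_location = week_to_location[week]
--             else:  # Skip weeks - return home then to next race location
--                 journey.append((current_location, 'Silverstone'))
--                 current_location = 'Silverstone'
--                 journey.append(('Silverstone', week_to_location[week]))
--                 current_location = week_to_location[week]
--
--     # After the final race, return home to Silverstone
--     journey.append((current_location, 'Silverstone'))
--
--     return journey
-- ===== SOURCE B (Python) =====
-- def create_postman_journey(race_weeks, cities_data):
--     """Two-pass version: build the ordered list of stops, then pair adjacent stops."""
--     week_to_location = {
--         9: 'Bahrain', 10: 'Saudi Arabia', 11: 'Australia', 12: 'Japan', 13: 'China',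
--         14: 'Miami', 15: 'Emilia Romagna', 16: 'Monaco', 17: 'Canada',
--         18: 'Spain', 19: 'Austria', 20: 'Britain', 21: 'Hungary',
--         22: 'Belgium', 23: 'Netherlands', 24: 'Italy', 25: 'Azerbaijan',
--         26: 'Singapore', 27: 'USA', 28: 'Mexico', 29: 'Brazil', 30: 'Las Vegas',
--         31: 'Qatar', 32: 'Abu Dhabi'
--     }
--     points = ['Silverstone']
--     prev = None
--     for week in race_weeks:
--         if prev is not None and week - prev != 1:
--             points.append('Silverstone')
--         points.append(week_to_location[week])
--         prev = week
--     points.append('Silverstone')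
--     return list(zip(points, points[1:]))
-- ===== Notes on version B (the rewrite author's own statement) =====
-- stated objective: simpler
-- what changed: B first builds the ordered list of stops (inserting a 'Silverstone' return before each non-continuous week) and then pairs adjacent stops with zip(points, points[1:]), instead of A's single loop that tracks current_location and emits (from,to) tuples inline.
import Mathlib
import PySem

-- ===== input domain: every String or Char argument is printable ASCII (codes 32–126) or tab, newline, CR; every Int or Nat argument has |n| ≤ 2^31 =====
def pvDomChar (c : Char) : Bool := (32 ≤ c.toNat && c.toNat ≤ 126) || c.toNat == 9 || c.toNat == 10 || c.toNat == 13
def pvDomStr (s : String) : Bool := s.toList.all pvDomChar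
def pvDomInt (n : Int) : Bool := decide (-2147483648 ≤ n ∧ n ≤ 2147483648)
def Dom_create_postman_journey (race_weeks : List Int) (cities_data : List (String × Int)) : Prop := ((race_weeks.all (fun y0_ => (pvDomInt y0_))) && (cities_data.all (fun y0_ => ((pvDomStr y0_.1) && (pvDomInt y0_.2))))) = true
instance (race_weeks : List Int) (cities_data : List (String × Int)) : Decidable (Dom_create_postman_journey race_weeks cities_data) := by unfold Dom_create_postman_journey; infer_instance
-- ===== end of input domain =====

-- B builds the path of stops and zips adjacent pairs, instead of A's inline tuple emission (objective: simpler).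
-- A raises KeyError for any week outside 9..32; Pre_ excludes exactly those inputs (both programs raise there).

-- ===== PORT A =====
-- the week→location dict; total helper, exact on weeks 9..32 (Pre_ guarantees membership, so no KeyError arises)
def wkloc (w : Int) : String :=
  if w = 9 then "Bahrain" else if w = 10 then "Saudi Arabia" else if w = 11 then "Australia"
  else if w = 12 then "Japan" else if w = 13 then "China" else if w = 14 then "Miami"
  else if w = 15 then "Emilia Romagna" else if w = 16 then "Monaco" else if w = 17 then "Canada"
  else if w = 18 then "Spain" else if w = 19 then "Austria" else if w = 20 then "Britain"
  else if w = 21 then "Hungary" else if w = 22 then "Belgium" else if w = 23 then "Netherlands"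
  else if w = 24 then "Italy" else if w = 25 then "Azerbaijan" else if w = 26 then "Singapore"
  else if w = 27 then "USA" else if w = 28 then "Mexico" else if w = 29 then "Brazil"
  else if w = 30 then "Las Vegas" else if w = 31 then "Qatar" else "Abu Dhabi"

-- A's loop over enumerate(race_weeks) with state (journey, current_location); race_weeks[idx-1] via getD
def goA (race_weeks : List Int) : Nat → List Int → List (String × String) → String → List (String × String)
  | _, [], journey, cur => journey ++ [(cur, "Silverstone")]
  | idx, week :: rest, journey, cur =>
    if idx = 0 then
      goA race_weeks (idx + 1) rest (journey ++ [("Silverstone", wkloc week)]) (wkloc week)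
    else if week - race_weeks.getD (idx - 1) 0 = 1 then
      goA race_weeks (idx + 1) rest (journey ++ [(cur, wkloc week)]) (wkloc week)
    else
      goA race_weeks (idx + 1) rest (journey ++ [(cur, "Silverstone"), ("Silverstone", wkloc week)]) (wkloc week)

def create_postman_journey (race_weeks : List Int) (cities_data : List (String × Int)) : List (String × String) :=
  goA race_weeks 0 race_weeks [] "Silverstone"

-- ===== PORT B =====
-- B's loop building `points` (prev : Option Int tracks the previous week)
def goB : List Int → List String → Option Int → List String
  | [], pts, _ => pts ++ ["Silverstone"]
  | week :: rest, pts, prev =>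
    let pts' := match prev with
      | some p => if week - p ≠ 1 then pts ++ ["Silverstone"] else pts
      | none => pts
    goB rest (pts' ++ [wkloc week]) (some week)

def create_postman_journey_alt (race_weeks : List Int) (cities_data : List (String × Int)) : List (String × String) :=
  let points := goB race_weeks ["Silverstone"] none
  points.zip points.tail  -- zip(points, points[1:]): points[1:] on a nonempty list is its tail

-- ===== PRECONDITION & SPEC =====
-- Pre_ excludes exactly the inputs on which A raises KeyError (a week outside the 9..32 dict).
def Pre_create_postman_journey (race_weeks : List Int) (cities_data : List (String × Int)) : Prop :=
  ∀ w ∈ race_weeks, 9 ≤ w ∧ w ≤ 32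
instance (race_weeks : List Int) (cities_data : List (String × Int)) : Decidable (Pre_create_postman_journey race_weeks cities_data) := by unfold Pre_create_postman_journey; infer_instance
def pvWitness_create_postman_journey : List Int × (List (String × Int)) := ([9, 10, 12, 13], [("Bahrain", 1)])

def Spec_create_postman_journey (race_weeks : List Int) (cities_data : List (String × Int)) (out : List (String × String)) : Prop := out = create_postman_journey_alt race_weeks cities_data
instance (race_weeks : List Int) (cities_data : List (String × Int)) (out : List (String × String)) : Decidable (Spec_create_postman_journey race_weeks cities_data out) := by unfold Spec_create_postman_journey; infer_instance

-- ===== CLAIM (what is proved, stated in full; the proofs are below) =====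
def Claim_equal_create_postman_journey : Prop := ∀ (race_weeks : List Int) (cities_data : List (String × Int)), Dom_create_postman_journey race_weeks cities_data → Pre_create_postman_journey race_weeks cities_data → Spec_create_postman_journey race_weeks cities_data (create_postman_journey race_weeks cities_data)

-- ===== LEMMAS AND PROOFS =====

-- appending one stop to a nonempty path appends one segment to its adjacent-pair list
lemma zip_tail_append_singleton (pts : List String) (x : String) (h : pts ≠ []) :
    (pts ++ [x]).zip (pts ++ [x]).tail = pts.zip pts.tail ++ [(pts.getLastD "", x)] := by
  induction pts with
  | nil => exact absurd rfl h
  | cons a t ih =>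
    cases t with
    | nil => simp
    | cons b t' =>
      have := ih (by simp)
      simp only [List.cons_append, List.zip_cons_cons, List.tail_cons] at *
      simp [this]

lemma goA_eq_goB (rw : List Int) (rest : List Int) :
    ∀ (idx : Nat) (pts : List String) (prev : Option Int),
      rest = rw.drop idx → pts ≠ [] →
      (idx = 0 → pts = ["Silverstone"] ∧ prev = none) →
      (idx ≠ 0 → prev = some (rw.getD (idx - 1) 0)) →
      goA rw idx rest (pts.zip pts.tail) (pts.getLastD "") =
        (goB rest pts prev).zip (goB rest pts prev).tail := by
  induction rest with
  | nil =>
    intro idx pts prev _ hne _ _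
    simp [goA, goB, zip_tail_append_singleton pts "Silverstone" hne]
  | cons week rest' ih =>
    intro idx pts prev hdrop hne h0 hpos
    have hweek : rw[idx]?.getD 0 = week := by
      have : rw[idx]? = some week := by
        have := congrArg List.head? hdrop
        simpa [List.head?_drop] using this.symm
      simp [this]
    have hdrop' : rest' = rw.drop (idx + 1) := by
      have := congrArg List.tail hdrop
      simpa [List.tail_drop] using this
    by_cases hidx : idx = 0
    · subst hidx
      obtain ⟨hpts, hprev⟩ := h0 rfl
      subst hpts; subst hprev
      show goA rw 1 rest' ([("Silverstone", wkloc week)]) (wkloc week) = _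
      have := ih 1 ["Silverstone", wkloc week] (some week) hdrop' (by simp)
        (by intro h; omega) (by intro _; simp only [List.getD]; rw [hweek])
      simpa [goA, goB] using this
    · have hprev := hpos hidx
      subst hprev
      by_cases hcont : week - rw[idx - 1]?.getD 0 = 1
      · simp only [goA, goB, List.getD, hidx, if_pos hcont]
        have := ih (idx + 1) (pts ++ [wkloc week]) (some week) hdrop' (by simp)
          (by intro h; omega) (by intro _; simp only [List.getD, Nat.add_sub_cancel]; rw [hweek])
        simp only [zip_tail_append_singleton pts (wkloc week) hne] at this
        simpa [goB, List.getD, hcont, hidx] using this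
      · simp only [goA, goB, List.getD, hidx, if_neg hcont]
        have hne' : pts ++ ["Silverstone"] ≠ [] := by simp
        have := ih (idx + 1) ((pts ++ ["Silverstone"]) ++ [wkloc week]) (some week) hdrop'
          (by simp) (by intro h; omega) (by intro _; simp only [List.getD, Nat.add_sub_cancel]; rw [hweek])
        simp only [zip_tail_append_singleton _ (wkloc week) hne',
          zip_tail_append_singleton pts "Silverstone" hne] at this
        simpa [goB, List.getD, hcont, hidx, List.append_assoc] using this

-- ===== VERDICT (by name: the statement is the Claim_ definition above) =====
theorem create_postman_journey_spec : Claim_equal_create_postman_journey := by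
  intro race_weeks cities_data _ _
  show create_postman_journey race_weeks cities_data = create_postman_journey_alt race_weeks cities_data
  have := goA_eq_goB race_weeks race_weeks 0 ["Silverstone"] none rfl (by simp)
    (by intro _; exact ⟨rfl, rfl⟩) (by intro h; exact absurd rfl h)
  simpa [create_postman_journey, create_postman_journey_alt] using this
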